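-- pv_equiv track=rewrite | github.com/jwc20/bol | leetcode/2024_03_16/1.py | check
-- ===== SOURCE A (Python) =====
-- def check(nums, queries, limit):
--     prefix = [nums[0]]
--     result = []
--
--     for i in range(1, len(nums)):
--         prefix.append(nums[i] + prefix[-1])
--
--     for x, y in queries:
--         subarray_sum = prefix[y] - prefix[x] + nums[x]
--         result.append(subarray_sum < limit)
--
--     return result
-- ===== SOURCE B (Python) =====
-- def check(nums, queries, limit):
--     # Per-query direct summation: no prefix table; sum(nums[:i]) scans the list
--     # for each query instead of looking up a precomputed prefix array.
--     result = []
--     for x, y in queries: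
--         result.append(sum(nums[:y]) + nums[y] - sum(nums[:x]) < limit)
--     return result
-- ===== Notes on version B (the rewrite author's own statement) =====
-- stated objective: simpler
-- what changed: Replaces the precomputed prefix-sum table and its O(1) lookups by a direct per-query slice summation (sum(nums[:y]) + nums[y] - sum(nums[:x])), so no prefix state is built or maintained.
import Mathlib
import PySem

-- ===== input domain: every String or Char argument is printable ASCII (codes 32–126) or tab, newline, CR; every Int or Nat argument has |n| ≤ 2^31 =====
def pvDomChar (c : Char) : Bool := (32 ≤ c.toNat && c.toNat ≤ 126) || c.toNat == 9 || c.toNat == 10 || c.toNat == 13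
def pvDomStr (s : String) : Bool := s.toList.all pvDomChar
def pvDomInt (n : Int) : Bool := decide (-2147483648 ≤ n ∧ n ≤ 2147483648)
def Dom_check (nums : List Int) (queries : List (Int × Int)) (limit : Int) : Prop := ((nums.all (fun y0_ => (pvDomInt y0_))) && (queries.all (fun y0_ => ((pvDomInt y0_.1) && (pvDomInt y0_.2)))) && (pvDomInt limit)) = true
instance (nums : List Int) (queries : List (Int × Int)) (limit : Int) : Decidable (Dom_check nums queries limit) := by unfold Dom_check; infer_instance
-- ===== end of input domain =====

-- B drops A's prefix-sum table and answers each query by direct slice summation (simpler, no precomputed state).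

-- ===== PORT A =====
def check (nums : List Int) (queries : List (Int × Int)) (limit : Int) : List Bool :=
  let pre0 : List Int := [PySem.List.pyGetD nums 0 0]
  let prefixL : List Int := (PySem.List.pyRange 1 (nums.length : Int) 1).foldl
    (fun p i => p ++ [PySem.List.pyGetD nums i 0 + PySem.List.pyGetD p (-1) 0]) pre0
  queries.foldl (fun res q =>
    res ++ [decide (PySem.List.pyGetD prefixL q.2 0 - PySem.List.pyGetD prefixL q.1 0
                    + PySem.List.pyGetD nums q.1 0 < limit)]) []

-- ===== PORT B =====
def check_alt (nums : List Int) (queries : List (Int × Int)) (limit : Int) : List Bool :=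
  queries.map (fun q =>
    decide ((PySem.List.slice nums none (some q.2)).sum + PySem.List.pyGetD nums q.2 0
            - (PySem.List.slice nums none (some q.1)).sum < limit))

-- ===== PRECONDITION & SPEC =====
-- Pre_ excludes exactly the inputs on which A raises IndexError: empty nums (nums[0]) and
-- queries whose indices fall outside Python's valid index range [-len(nums), len(nums)-1].
def Pre_check (nums : List Int) (queries : List (Int × Int)) (limit : Int) : Prop :=
  nums ≠ [] ∧ ∀ q ∈ queries,
    (-(nums.length : Int) ≤ q.1 ∧ q.1 < (nums.length : Int)) ∧
    (-(nums.length : Int) ≤ q.2 ∧ q.2 < (nums.length : Int))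
instance (nums : List Int) (queries : List (Int × Int)) (limit : Int) : Decidable (Pre_check nums queries limit) := by unfold Pre_check; infer_instance

def pvWitness_check : List Int × (List (Int × Int)) × Int := ([1, 2, 3], [(0, 2), (2, 1), (-1, -3)], 4)

def Spec_check (nums : List Int) (queries : List (Int × Int)) (limit : Int) (out : List Bool) : Prop := out = check_alt nums queries limit
instance (nums : List Int) (queries : List (Int × Int)) (limit : Int) (out : List Bool) : Decidable (Spec_check nums queries limit out) := by unfold Spec_check; infer_instance

-- ===== CLAIM (what is proved, stated in full; the proofs are below) =====
def Claim_equal_check : Prop := ∀ (nums : List Int) (queries : List (Int × Int)) (limit : Int), Dom_check nums queries limit → Pre_check nums queries limit → Spec_check nums queries limit (check nums queries limit)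

-- ===== LEMMAS AND PROOFS =====

-- running prefix sums of the first m elements (m ≥ 1): [sum take 1, …, sum take m]
def pvPfx (nums : List Int) (m : Nat) : List Int :=
  (List.range m).map (fun k => (nums.take (k + 1)).sum)

-- sum of take (k+1) splits off the k-th element
theorem pvSum_take_succ (nums : List Int) (k : Nat) (hk : k < nums.length) :
    (nums.take (k + 1)).sum = (nums.take k).sum + nums[k]'hk := by
  rw [List.take_add_one, List.sum_append]
  simp [List.getElem?_eq_getElem hk]

-- the A-side loop builds exactly pvPfx nums m
theorem pvPrefix_loop (nums : List Int) (m : Nat) (h1 : 1 ≤ m) (h2 : m ≤ nums.length) :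
    (PySem.List.pyRange 1 (m : Int) 1).foldl
      (fun p i => p ++ [PySem.List.pyGetD nums i 0 + PySem.List.pyGetD p (-1) 0])
      [PySem.List.pyGetD nums 0 0] = pvPfx nums m := by
  induction m with
  | zero => omega
  | succ m ih =>
    by_cases hm : m = 0
    · subst hm
      simp [PySem.List.pyRange_one_eq_nil, pvPfx, PySem.List.pyGetD_zero]
      cases nums with
      | nil => simp at h2
      | cons a t => simp
    · have h1m : 1 ≤ m := by omega
      have h2m : m ≤ nums.length := by omega
      have hrange : PySem.List.pyRange 1 ((m : Int) + 1) 1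
          = PySem.List.pyRange 1 (m : Int) 1 ++ [(m : Int)] :=
        PySem.List.pyRange_one_succ_right (by exact_mod_cast h1m)
      have hcast : ((m + 1 : Nat) : Int) = (m : Int) + 1 := by push_cast; ring
      rw [hcast, hrange, List.foldl_append, ih h1m h2m]
      simp only [List.foldl]
      have hlast : PySem.List.pyGetD (pvPfx nums m) (-1) 0 = (nums.take m).sum := by
        have hsplit : pvPfx nums m = pvPfx nums (m - 1) ++ [(nums.take m).sum] := by
          unfold pvPfx
          rw [show m = (m - 1) + 1 by omega, List.range_succ]
          simp [show m - 1 + 1 = m by omega]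
        rw [hsplit, PySem.List.pyGetD_neg_one_append_singleton]
      have hget : PySem.List.pyGetD nums (m : Int) 0 = nums[m]'(by omega) := by
        rw [PySem.List.pyGetD_natCast]
        exact List.getD_eq_getElem nums 0 (by omega)
      rw [hlast, hget]
      unfold pvPfx
      rw [List.range_succ]
      simp only [List.map_append, List.map_cons, List.map_nil]
      congr 1
      simp only [List.cons.injEq, and_true]
      rw [pvSum_take_succ nums m (by omega)]
      ring

-- j is the normalized (Python) index for i
def pvNorm (nums : List Int) (i : Int) (j : Nat) : Prop :=
  i = j ∨ (i + nums.length = j ∧ i < 0)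

-- indexing the prefix list at a valid Python index i gives the sum of the first j+1 elements
theorem pvPfx_get (nums : List Int) (i : Int) (j : Nat) (hj : j < nums.length)
    (h : pvNorm nums i j) :
    PySem.List.pyGetD (pvPfx nums nums.length) i 0 = (nums.take (j + 1)).sum := by
  have hlen : (pvPfx nums nums.length).length = nums.length := by simp [pvPfx]
  have hval : ∀ (hj' : j < (pvPfx nums nums.length).length),
      (pvPfx nums nums.length)[j]'hj' = (nums.take (j + 1)).sum := by
    intro hj'
    simp only [pvPfx, List.getElem_map, List.getElem_range]
  rcases h with h | ⟨h, hneg⟩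
  · rw [PySem.List.pyGetD_eq_getElem _ _ (by omega) (by omega)]
    exact (getElem_congr rfl (by omega : i.toNat = j) (by omega)).trans (hval (by omega))
  · have hi : i = -((((-i).toNat : Nat)) : Int) := by omega
    rw [hi, PySem.List.pyGetD_neg_natCast _ _ _ (by omega) (by omega)]
    exact (getElem_congr rfl (by omega : (pvPfx nums nums.length).length - (-i).toNat = j)
      (by omega)).trans (hval (by omega))

-- indexing nums at a valid Python index i
theorem pvNums_get (nums : List Int) (i : Int) (j : Nat) (hj : j < nums.length)
    (h : pvNorm nums i j) :
    PySem.List.pyGetD nums i 0 = nums[j]'hj := by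
  rcases h with h | ⟨h, hneg⟩
  · rw [PySem.List.pyGetD_eq_getElem _ _ (by omega) (by omega)]
    exact getElem_congr rfl (by omega : i.toNat = j) (by omega)
  · have hi : i = -((((-i).toNat : Nat)) : Int) := by omega
    rw [hi, PySem.List.pyGetD_neg_natCast _ _ _ (by omega) (by omega)]
    exact getElem_congr rfl (by omega : nums.length - (-i).toNat = j) (by omega)

-- B's slice nums[:i] at a valid Python index i is take j
theorem pvSlice_take (nums : List Int) (i : Int) (j : Nat) (hj : j < nums.length)
    (h : pvNorm nums i j) :
    PySem.List.slice nums none (some i) = nums.take j := by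
  rcases h with h | ⟨h, hneg⟩
  · rw [PySem.List.slice_to nums (by omega), show i.toNat = j by omega]
  · have hi : i = -((((-i).toNat : Nat)) : Int) := by omega
    rw [hi, PySem.List.slice_to_neg_natCast nums _ (by omega)]
    rw [show nums.length - (-i).toNat = j by omega]

-- per-query agreement of the two bodies
theorem pvQuery_eq (nums : List Int) (limit : Int) (x y : Int)
    (hx : -(nums.length : Int) ≤ x ∧ x < (nums.length : Int))
    (hy : -(nums.length : Int) ≤ y ∧ y < (nums.length : Int)) :
    decide (PySem.List.pyGetD (pvPfx nums nums.length) y 0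
            - PySem.List.pyGetD (pvPfx nums nums.length) x 0
            + PySem.List.pyGetD nums x 0 < limit)
    = decide ((PySem.List.slice nums none (some y)).sum + PySem.List.pyGetD nums y 0
            - (PySem.List.slice nums none (some x)).sum < limit) := by
  obtain ⟨ix, hixl, hixn⟩ : ∃ j : Nat, j < nums.length ∧ pvNorm nums x j := by
    by_cases h0 : x < 0
    · exact ⟨(x + nums.length).toNat, by omega, Or.inr ⟨by omega, h0⟩⟩
    · exact ⟨x.toNat, by omega, Or.inl (by omega)⟩
  obtain ⟨iy, hiyl, hiyn⟩ : ∃ j : Nat, j < nums.length ∧ pvNorm nums y j := by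
    by_cases h0 : y < 0
    · exact ⟨(y + nums.length).toNat, by omega, Or.inr ⟨by omega, h0⟩⟩
    · exact ⟨y.toNat, by omega, Or.inl (by omega)⟩
  rw [pvPfx_get nums y iy hiyl hiyn, pvPfx_get nums x ix hixl hixn,
      pvNums_get nums x ix hixl hixn, pvNums_get nums y iy hiyl hiyn,
      pvSlice_take nums x ix hixl hixn, pvSlice_take nums y iy hiyl hiyn,
      pvSum_take_succ nums ix hixl, pvSum_take_succ nums iy hiyl]
  have harith : (nums.take iy).sum + nums[iy]'hiyl - ((nums.take ix).sum + nums[ix]'hixl)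
      + nums[ix]'hixl = (nums.take iy).sum + nums[iy]'hiyl - (nums.take ix).sum := by ring
  rw [harith]

-- ===== VERDICT (by name: the statement is the Claim_ definition above) =====
theorem check_spec : Claim_equal_check := by
  intro nums queries limit _ hpre
  obtain ⟨hne, hq⟩ := hpre
  have hn : 1 ≤ nums.length := by cases nums <;> simp_all
  unfold Spec_check check check_alt
  simp only []
  rw [pvPrefix_loop nums nums.length hn le_rfl]
  rw [PySem.List.foldl_append_singleton_eq_map]
  simp only [List.nil_append]
  apply List.map_congr_left
  intro q hqmem
  exact pvQuery_eq nums limit q.1 q.2 (hq q hqmem).1 (hq q hqmem).2
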